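-- pv_equiv track=rewrite | github.com/gong7788/UG4_project | correctingagent/util/rules.py | equals_CPD
-- ===== SOURCE A (Python) =====
-- def equals_CPD(seta, setb, carda=None, cardb=None):
--     if len(seta) != len(setb):
--         raise TypeError('Lengths do not match')
--     if carda is None:
--         carda = [2]*len(seta)
--     if cardb is None:
--         cardb = [2]*len(setb)
--     results = []
--     def helper(settingsa, cardsa, settingsb, cardsb):
--         if len(cardsa) == 0:
--             results.append(int(all([a == b for a,b in zip(settingsa, settingsb)])))
--         else:
--             for i in range(cardsa[0]):
--                 for j in range(cardsb[0]):
--                     sa = settingsa.copy()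
--                     sb = settingsb.copy()
--                     helper(sa+[i], cardsa[1:], sb+[j], cardsb[1:])
--     helper([], carda, [], cardb)
--
--     return results
-- ===== SOURCE B (Python) =====
-- # B (alternative algorithm): iterative left-to-right product build with a running
-- # match bit -- no setting tuples, no list copies, no per-leaf zip/all scan; stops
-- # as soon as the enumeration dies out.
-- def equals_CPD(seta, setb, carda=None, cardb=None):
--     if len(seta) != len(setb):
--         raise TypeError('Lengths do not match')
--     if carda is None:
--         carda = [2] * len(seta)
--     if cardb is None:
--         cardb = [2] * len(setb)
--     results = [1]
--     k = 0
--     for ca in carda: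
--         new = []
--         for r in results:
--             for i in range(ca):
--                 for j in range(cardb[k]):
--                     new.append(r * (1 if i == j else 0))
--         if not new:
--             return new
--         results = new
--         k += 1
--     return results
-- ===== Notes on version B (the rewrite author's own statement) =====
-- stated objective: alternative
-- what changed: Replaces A's recursion that copies and extends full setting tuples and runs a zip/all scan at every leaf by an iterative left-to-right product build that carries a single running match bit per partial assignment and stops once no assignment survives; no setting lists are ever materialised.
import Mathlib
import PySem

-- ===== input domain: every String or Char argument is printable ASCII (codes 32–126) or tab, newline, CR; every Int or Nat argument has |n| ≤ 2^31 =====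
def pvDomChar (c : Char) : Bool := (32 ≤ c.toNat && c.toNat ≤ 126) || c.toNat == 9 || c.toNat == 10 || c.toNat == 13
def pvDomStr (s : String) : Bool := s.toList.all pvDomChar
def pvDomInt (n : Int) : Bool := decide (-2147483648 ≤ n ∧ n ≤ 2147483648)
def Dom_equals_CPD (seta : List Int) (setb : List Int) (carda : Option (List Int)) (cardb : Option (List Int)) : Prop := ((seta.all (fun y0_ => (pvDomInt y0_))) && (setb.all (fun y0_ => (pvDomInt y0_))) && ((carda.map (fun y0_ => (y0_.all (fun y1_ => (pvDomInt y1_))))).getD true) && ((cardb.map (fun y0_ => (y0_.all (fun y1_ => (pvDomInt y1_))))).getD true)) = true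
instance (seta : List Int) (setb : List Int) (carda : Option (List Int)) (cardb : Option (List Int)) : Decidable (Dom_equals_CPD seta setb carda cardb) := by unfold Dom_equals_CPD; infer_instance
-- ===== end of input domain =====

-- ===== PORT A =====
-- B replaces A's tuple-building recursion by an iterative product build with a
-- running match bit (objective: alternative algorithm; same exact values).
def equalsHelper (settingsa : List Int) (cardsa : List Int) (settingsb : List Int)
    (cardsb : List Int) (results : List Int) : List Int :=
  match cardsa with
  | [] => results ++ [if (List.zip settingsa settingsb).all (fun p => p.1 == p.2) then 1 else 0]
  | c :: rest =>
    (PySem.List.pyRange 0 c 1).foldl (fun acc i =>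
      (PySem.List.pyRange 0 (cardsb.headD 0) 1).foldl (fun acc2 j =>
        equalsHelper (settingsa ++ [i]) rest (settingsb ++ [j]) (cardsb.drop 1) acc2) acc) results

def equals_CPD (seta : List Int) (setb : List Int) (carda : Option (List Int)) (cardb : Option (List Int)) : List Int :=
  if seta.length ≠ setb.length then []  -- Python raises TypeError here; excluded by Pre_
  else equalsHelper [] (carda.getD (List.replicate seta.length 2))
                    [] (cardb.getD (List.replicate setb.length 2)) []

-- ===== PORT B =====
def altLoop (cardsa : List Int) (cb : List Int) (k : Int) (results : List Int) : List Int :=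
  match cardsa with
  | [] => results
  | ca :: cas =>
    let new := results.foldl (fun new r =>
      (PySem.List.pyRange 0 ca 1).foldl (fun n2 i =>
        (PySem.List.pyRange 0 (PySem.List.pyGetD cb k 0) 1).foldl (fun n3 j =>
          n3 ++ [r * (if i == j then 1 else 0)]) n2) new) []
    if new = [] then new else altLoop cas cb (k + 1) new

def equals_CPD_alt (seta : List Int) (setb : List Int) (carda : Option (List Int)) (cardb : Option (List Int)) : List Int :=
  if seta.length ≠ setb.length then []  -- same TypeError as A; excluded by Pre_
  else altLoop (carda.getD (List.replicate seta.length 2))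
               (cardb.getD (List.replicate setb.length 2)) 0 [1]

-- ===== PRECONDITION & SPEC =====
-- Pre_ excludes exactly the inputs on which Python A raises: TypeError when the set
-- lengths differ, and IndexError when cardb runs out while the enumeration is still
-- live (all earlier cardinalities positive and the current carda entry positive).
def Pre_equals_CPD (seta : List Int) (setb : List Int) (carda : Option (List Int)) (cardb : Option (List Int)) : Prop :=
  seta.length = setb.length ∧
  ¬ ((cardb.getD (List.replicate setb.length 2)).length < (carda.getD (List.replicate seta.length 2)).length ∧
     0 < (carda.getD (List.replicate seta.length 2)).getD (cardb.getD (List.replicate setb.length 2)).length 0 ∧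
     ∀ p ∈ List.zip (carda.getD (List.replicate seta.length 2)) (cardb.getD (List.replicate setb.length 2)),
       0 < p.1 ∧ 0 < p.2)
instance (seta : List Int) (setb : List Int) (carda : Option (List Int)) (cardb : Option (List Int)) : Decidable (Pre_equals_CPD seta setb carda cardb) := by unfold Pre_equals_CPD; infer_instance

def pvWitness_equals_CPD : List Int × List Int × Option (List Int) × Option (List Int) :=
  ([0], [5], some [2], some [3, 1])

def Spec_equals_CPD (seta : List Int) (setb : List Int) (carda : Option (List Int)) (cardb : Option (List Int)) (out : List Int) : Prop := out = equals_CPD_alt seta setb carda cardb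
instance (seta : List Int) (setb : List Int) (carda : Option (List Int)) (cardb : Option (List Int)) (out : List Int) : Decidable (Spec_equals_CPD seta setb carda cardb out) := by unfold Spec_equals_CPD; infer_instance

-- ===== CLAIM (what is proved, stated in full; the proofs are below) =====
def Claim_equal_equals_CPD : Prop := ∀ (seta : List Int) (setb : List Int) (carda : Option (List Int)) (cardb : Option (List Int)), Dom_equals_CPD seta setb carda cardb → Pre_equals_CPD seta setb carda cardb → Spec_equals_CPD seta setb carda cardb (equals_CPD seta setb carda cardb)

-- ===== LEMMAS AND PROOFS =====
-- altRef: proof-only reference form of B's loop (cardb consumed positionally, no early exit)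
def altRef (cardsa : List Int) (rest : List Int) (results : List Int) : List Int :=
  match cardsa with
  | [] => results
  | ca :: cas =>
    altRef cas (rest.drop 1)
      (results.foldl (fun new r =>
        (PySem.List.pyRange 0 ca 1).foldl (fun n2 i =>
          (PySem.List.pyRange 0 (rest.headD 0) 1).foldl (fun n3 j =>
            n3 ++ [r * (if i == j then 1 else 0)]) n2) new) [])

theorem bit_append (sa sb : List Int) (i j : Int) (h : sa.length = sb.length) :
    (if (List.zip (sa ++ [i]) (sb ++ [j])).all (fun p => p.1 == p.2) then (1 : Int) else 0)
      = (if (List.zip sa sb).all (fun p => p.1 == p.2) then (1 : Int) else 0)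
          * (if i == j then 1 else 0) := by
  rw [List.zip_append h, List.all_append]
  split_ifs <;> simp_all

theorem stepNew (ca0 cb0 : Int) (xs acc : List Int) :
    xs.foldl (fun new r =>
      (PySem.List.pyRange 0 ca0 1).foldl (fun n2 i =>
        (PySem.List.pyRange 0 cb0 1).foldl (fun n3 j =>
          n3 ++ [r * (if i == j then 1 else 0)]) n2) new) acc
    = acc ++ xs.flatMap (fun r =>
        (PySem.List.pyRange 0 ca0 1).flatMap (fun i =>
          (PySem.List.pyRange 0 cb0 1).map (fun j => r * (if i == j then 1 else 0)))) := by
  simp only [PySem.List.foldl_append_singleton_eq_map, PySem.List.foldl_append_eq_flatMap]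

theorem altRef_nil (ca cb : List Int) : altRef ca cb [] = [] := by
  induction ca generalizing cb with
  | nil => rfl
  | cons c cas ih => simp [altRef, ih]

theorem altRef_append (ca : List Int) : ∀ (cb xs ys : List Int),
    altRef ca cb (xs ++ ys) = altRef ca cb xs ++ altRef ca cb ys := by
  induction ca with
  | nil => intro cb xs ys; rfl
  | cons c cas ih =>
    intro cb xs ys
    simp only [altRef, stepNew, List.nil_append, List.flatMap_append]
    exact ih _ _ _

theorem altRef_sing (ca cb : List Int) : ∀ (xs : List Int),
    altRef ca cb xs = xs.flatMap (fun x => altRef ca cb [x]) := by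
  intro xs
  induction xs with
  | nil => simp [altRef_nil]
  | cons x xs ih =>
    have : x :: xs = [x] ++ xs := rfl
    rw [this, altRef_append, ih]
    simp

theorem helper_eq (ca : List Int) : ∀ (cb sa sb res : List Int), sa.length = sb.length →
    equalsHelper sa ca sb cb res
      = res ++ altRef ca cb [if (List.zip sa sb).all (fun p => p.1 == p.2) then 1 else 0] := by
  induction ca with
  | nil => intro cb sa sb res h; rfl
  | cons c cas ih =>
    intro cb sa sb res h
    have hb : ∀ (i j : Int) (acc2 : List Int),
        equalsHelper (sa ++ [i]) cas (sb ++ [j]) (cb.drop 1) acc2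
          = acc2 ++ altRef cas (cb.drop 1)
              [(if (List.zip sa sb).all (fun p => p.1 == p.2) then (1 : Int) else 0)
                 * (if i == j then 1 else 0)] := by
      intro i j acc2
      rw [ih (cb.drop 1) (sa ++ [i]) (sb ++ [j]) acc2 (by simp [h]), bit_append sa sb i j h]
    have hR : altRef (c :: cas) cb
        [if (List.zip sa sb).all (fun p => p.1 == p.2) then (1 : Int) else 0]
        = (PySem.List.pyRange 0 c 1).flatMap (fun i =>
            (PySem.List.pyRange 0 (cb.headD 0) 1).flatMap (fun j =>
              altRef cas (cb.drop 1)
                [(if (List.zip sa sb).all (fun p => p.1 == p.2) then (1 : Int) else 0)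
                   * (if i == j then 1 else 0)])) := by
      simp only [altRef, stepNew, List.nil_append, List.flatMap_cons, List.flatMap_nil,
        List.append_nil]
      rw [altRef_sing]
      simp [List.flatMap_assoc, List.flatMap_map]
    show (PySem.List.pyRange 0 c 1).foldl (fun acc i =>
        (PySem.List.pyRange 0 (cb.headD 0) 1).foldl (fun acc2 j =>
          equalsHelper (sa ++ [i]) cas (sb ++ [j]) (cb.drop 1) acc2) acc) res = _
    simp only [hb, PySem.List.foldl_append_eq_flatMap, hR]


-- ===== VERDICT (by name: the statement is the Claim_ definition above) =====

theorem headD_drop (cb : List Int) (k : Nat) :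
    (List.drop k cb).headD 0 = PySem.List.pyGetD cb (k : Int) 0 := by
  simp [List.headD_eq_head?_getD, List.head?_drop, List.getD_eq_getElem?_getD]

theorem altLoop_eq_ref (cb : List Int) : ∀ (ca : List Int) (k : Nat) (res : List Int),
    altLoop ca cb (k : Int) res = altRef ca (List.drop k cb) res := by
  intro ca
  induction ca with
  | nil => intro k res; rfl
  | cons c cas ih =>
    intro k res
    simp only [altLoop, altRef, headD_drop cb k]
    split_ifs with hnew
    · rw [hnew, altRef_nil]
    · rw [show ((k : Int) + 1) = ((k + 1 : Nat) : Int) by push_cast; ring, ih (k + 1)]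
      rw [List.drop_drop]

theorem equals_CPD_spec : Claim_equal_equals_CPD := by
  intro seta setb carda cardb _ _
  unfold Spec_equals_CPD equals_CPD equals_CPD_alt
  split_ifs with hlen
  · rfl
  · rw [helper_eq _ _ [] [] [] rfl,
      show (0 : Int) = ((0 : Nat) : Int) from rfl, altLoop_eq_ref]
    rfl
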